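-- pv_equiv track=rewrite | github.com/dtauraso/graphics | tic_tac_toe.py | upToDownDiagonalsPart1
-- ===== SOURCE A (Python) =====
-- def upToDownDiagonalsPart1(length, record_board, main_list):
--
--     '''
--         This function records diagonals from the record board.
--
--         assumptions:
--         length is an integer
--         record_board has been made
--         main_list is a list with 0 elements
--
--         input:
--         length, record_board, main_list
--         output:
--         main_list
--     '''
--
--     # loop through each pivot column that starts in the first row.
--     # For each column get all diagonals starting at column 1.
--     for column in range(1, length):
--
--         sub_list = []
--         row = 0
--
--         # Change other_column.
--         other_column = column
--
--         # The row stops increasing when the column number = 0.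
--         while other_column >= 0:
--
--             sub_list.append(record_board[row][other_column])
--             if column != 0:
--                 row = row + 1
--             other_column = other_column - 1
--
--         main_list.append(sub_list)
--
--     return main_list
-- ===== SOURCE B (Python) =====
-- def upToDownDiagonalsPart1(length, record_board, main_list):
--     # One row-major pass filling per-diagonal buckets (bucket s = cells with row+col == s),
--     # then append buckets 1..length-1 to the passed-in main_list (mutated, like the original).
--     buckets = [[] for _ in range(length)]
--     for row in range(length):
--         for col in range(length - row):
--             s = row + col
--             if s >= 1:
--                 buckets[s].append(record_board[row][col])
--     for s in range(1, length):
--         main_list.append(buckets[s])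
--     return main_list
-- ===== Notes on version B (the rewrite author's own statement) =====
-- stated objective: alternative
-- what changed: Replaces the per-diagonal while-loop walk (one pointer pair per pivot column) by a single row-major sweep that drops each cell into a bucket keyed by row+col, then emits buckets 1..length-1.
import Mathlib
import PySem

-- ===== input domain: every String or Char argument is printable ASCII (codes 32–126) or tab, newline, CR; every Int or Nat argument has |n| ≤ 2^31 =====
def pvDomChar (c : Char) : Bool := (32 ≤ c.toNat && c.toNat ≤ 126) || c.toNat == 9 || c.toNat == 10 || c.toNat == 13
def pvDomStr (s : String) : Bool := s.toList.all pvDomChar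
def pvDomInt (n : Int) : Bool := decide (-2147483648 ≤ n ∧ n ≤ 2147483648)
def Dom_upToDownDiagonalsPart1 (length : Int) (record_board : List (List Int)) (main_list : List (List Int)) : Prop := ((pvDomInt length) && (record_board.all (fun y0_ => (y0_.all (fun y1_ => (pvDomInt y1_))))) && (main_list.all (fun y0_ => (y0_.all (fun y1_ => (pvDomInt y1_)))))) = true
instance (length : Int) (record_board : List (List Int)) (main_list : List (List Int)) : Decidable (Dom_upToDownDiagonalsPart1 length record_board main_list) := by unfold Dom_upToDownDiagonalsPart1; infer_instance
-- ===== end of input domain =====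

-- B replaces A's per-diagonal pointer walk by one row-major sweep into buckets keyed by row+col
-- (same cost class); both Pythons append the diagonals to the caller's main_list in place, and
-- the equivalence proved here is about the returned value.

-- record_board[row][other_column], total form; Pre_ guarantees the indices are in range.
def pvCell (rb : List (List Int)) (r c : Int) : Int :=
  PySem.List.pyGetD (PySem.List.pyGetD rb r []) c 0

-- ===== PORT A =====
-- the `while other_column >= 0` loop; fuel = number of iterations = other_column + 1
def pvAWhile (rb : List (List Int)) (column : Int) : Nat → Int → Int → List Int → List Int
  | 0, _, _, sub => sub
  | n+1, row, oc, sub =>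
      pvAWhile rb column n (if column ≠ 0 then row + 1 else row) (oc - 1)
        (sub ++ [pvCell rb row oc])

def upToDownDiagonalsPart1 (length : Int) (record_board : List (List Int)) (main_list : List (List Int)) : List (List Int) :=
  (PySem.List.pyRange 1 length).foldl
    (fun acc column => acc ++ [pvAWhile record_board column (column + 1).toNat 0 column []])
    main_list

-- ===== PORT B =====
-- `if s >= 1: buckets[s].append(record_board[row][col])` for s = row+col
def pvBStep (rb : List (List Int)) (row : Int) (bs : List (List Int)) (col : Int) : List (List Int) :=
  if row + col ≥ 1 then
    PySem.List.pySetD bs (row + col)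
      (PySem.List.pyGetD bs (row + col) [] ++ [pvCell rb row col])
  else bs

-- buckets = [[] for _ in range(length)] filled by the two nested for-loops
def pvBuckets (rb : List (List Int)) (length : Int) : List (List Int) :=
  (PySem.List.pyRange 0 length).foldl
    (fun bs row => (PySem.List.pyRange 0 (length - row)).foldl (pvBStep rb row) bs)
    ((PySem.List.pyRange 0 length).map (fun _ => ([] : List Int)))

def upToDownDiagonalsPart1_alt (length : Int) (record_board : List (List Int)) (main_list : List (List Int)) : List (List Int) :=
  (PySem.List.pyRange 1 length).foldl
    (fun acc s => acc ++ [PySem.List.pyGetD (pvBuckets record_board length) s []]) main_list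

-- ===== PRECONDITION & SPEC =====
-- Pre_ excludes exactly the inputs on which Python A raises IndexError: when length ≥ 2,
-- rows 0..length-1 must exist and row r must reach column length-1-r.
def Pre_upToDownDiagonalsPart1 (length : Int) (record_board : List (List Int)) (main_list : List (List Int)) : Prop :=
  length < 2 ∨ (length ≤ (record_board.length : Int) ∧
    ∀ r ∈ List.range length.toNat, length - (r : Int) ≤ ((record_board.getD r []).length : Int))
instance (length : Int) (record_board : List (List Int)) (main_list : List (List Int)) : Decidable (Pre_upToDownDiagonalsPart1 length record_board main_list) := by unfold Pre_upToDownDiagonalsPart1; infer_instance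

def pvWitness_upToDownDiagonalsPart1 : Int × List (List Int) × List (List Int) :=
  (3, [[1,2,3],[4,5,6],[7,8,9]], [])

def Spec_upToDownDiagonalsPart1 (length : Int) (record_board : List (List Int)) (main_list : List (List Int)) (out : List (List Int)) : Prop := out = upToDownDiagonalsPart1_alt length record_board main_list
instance (length : Int) (record_board : List (List Int)) (main_list : List (List Int)) (out : List (List Int)) : Decidable (Spec_upToDownDiagonalsPart1 length record_board main_list out) := by unfold Spec_upToDownDiagonalsPart1; infer_instance

-- ===== CLAIM (what is proved, stated in full; the proofs are below) =====
def Claim_equal_upToDownDiagonalsPart1 : Prop := ∀ (length : Int) (record_board : List (List Int)) (main_list : List (List Int)), Dom_upToDownDiagonalsPart1 length record_board main_list → Pre_upToDownDiagonalsPart1 length record_board main_list → Spec_upToDownDiagonalsPart1 length record_board main_list (upToDownDiagonalsPart1 length record_board main_list)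

-- ===== LEMMAS AND PROOFS =====

-- the diagonal with constant row+col = s, rows increasing
def pvDiag (rb : List (List Int)) (s : Int) : List Int :=
  (List.range (s + 1).toNat).map (fun (r : Nat) => pvCell rb (r : Int) (s - (r : Int)))

-- bucket s after the first R rows have been swept
def pvBK (rb : List (List Int)) (R s : Nat) : List Int :=
  if s = 0 then [] else (List.range (min R (s + 1))).map (fun (r : Nat) => pvCell rb (r : Int) ((s : Int) - (r : Int)))

-- bucket s after R full rows and C cells of row R
def pvMix (rb : List (List Int)) (R C s : Nat) : List Int :=
  if R ≤ s ∧ s < R + C then pvBK rb (R + 1) s else pvBK rb R s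

lemma pvAWhile_eq (rb : List (List Int)) (c : Int) (hc : c ≠ 0) :
    ∀ (n : Nat) (row oc : Int) (sub : List Int),
      pvAWhile rb c n row oc sub
        = sub ++ (List.range n).map (fun (i : Nat) => pvCell rb (row + (i : Int)) (oc - (i : Int))) := by
  intro n
  induction n with
  | zero => intro row oc sub; simp [pvAWhile]
  | succ n ih =>
      intro row oc sub
      rw [pvAWhile, if_pos hc, ih, List.range_succ_eq_map, List.map_cons, List.map_map,
        List.append_assoc, List.singleton_append]
      congr 1
      congr 1
      · norm_num
      · apply List.map_congr_left
        intro i _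
        simp only [Function.comp_apply]
        congr 1 <;> push_cast <;> ring

lemma pvA_eq (l : Int) (rb ml : List (List Int)) :
    upToDownDiagonalsPart1 l rb ml = ml ++ (PySem.List.pyRange 1 l).map (fun c => pvDiag rb c) := by
  unfold upToDownDiagonalsPart1
  rw [PySem.List.foldl_append_singleton_eq_map]
  congr 1
  apply List.map_congr_left
  intro c hc
  rw [PySem.List.mem_pyRange_one] at hc
  have h1 : (c + 1).toNat = c.toNat + 1 := by omega
  have hc0 : c ≠ 0 := by omega
  rw [pvAWhile_eq rb c hc0, h1]
  unfold pvDiag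
  rw [h1]
  simp

lemma pv_set_map_range {α : Type} (f : Nat → α) (L j : Nat) (v : α) (_hj : j < L) :
    ((List.range L).map f).set j v = (List.range L).map (fun s => if s = j then v else f s) := by
  apply List.ext_getElem (by simp)
  intro i h1 h2
  simp only [List.getElem_set, List.getElem_map, List.getElem_range]
  split_ifs <;> first | rfl | omega

lemma pvBK_stable (rb : List (List Int)) (R R' s : Nat) (h1 : s + 1 ≤ R) (h2 : R ≤ R') :
    pvBK rb R s = pvBK rb R' s := by
  unfold pvBK
  have : min R (s + 1) = s + 1 := by omega
  have : min R' (s + 1) = s + 1 := by omega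
  simp [*]

lemma pvBK_succ (rb : List (List Int)) (R C : Nat) (h : 1 ≤ R + C) :
    pvBK rb (R + 1) (R + C) = pvBK rb R (R + C) ++ [pvCell rb (R : Int) (C : Int)] := by
  unfold pvBK
  have h0 : ¬ (R + C = 0) := by omega
  have h1 : min (R + 1) (R + C + 1) = R + 1 := by omega
  have h2 : min R (R + C + 1) = R := by omega
  rw [if_neg h0, if_neg h0, h1, h2, List.range_succ]
  simp

lemma pv_inner (rb : List (List Int)) (L R : Nat) (hR : R < L) :
    ∀ (k C : Nat), C + k = L - R →
      (PySem.List.pyRange (C : Int) ((L : Int) - (R : Int))).foldl (pvBStep rb (R : Int))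
          ((List.range L).map (pvMix rb R C))
        = (List.range L).map (pvMix rb R (L - R)) := by
  intro k
  induction k with
  | zero =>
      intro C hC
      have h1 : C = L - R := by omega
      rw [PySem.List.pyRange_one_eq_nil (by omega)]
      simp [h1]
  | succ k ih =>
      intro C hC
      have hCL : C < L - R := by omega
      rw [PySem.List.pyRange_one_cons (by omega)]
      rw [List.foldl_cons]
      have hstep : pvBStep rb (R : Int) ((List.range L).map (pvMix rb R C)) (C : Int)
          = (List.range L).map (pvMix rb R (C + 1)) := by
        unfold pvBStep
        by_cases hg : (R : Int) + (C : Int) ≥ 1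
        · rw [if_pos hg]
          have hRC : 1 ≤ R + C := by omega
          have hlt : R + C < L := by omega
          have hcast : (R : Int) + (C : Int) = ((R + C : Nat) : Int) := by push_cast; ring
          rw [hcast, PySem.List.pySetD_of_nonneg _ _ (by positivity)]
          rw [PySem.List.pyGetD_natCast]
          rw [PySem.List.getD_map_range _ _ _ _ (by simpa using hlt)]
          rw [Int.toNat_natCast]
          have hmix : pvMix rb R C (R + C) = pvBK rb R (R + C) := by
            unfold pvMix; rw [if_neg (by omega)]
          rw [hmix, pv_set_map_range _ _ _ _ (by simpa using hlt)]
          apply List.map_congr_left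
          intro s hs
          rw [List.mem_range] at hs
          by_cases h : s = R + C
          · subst h
            rw [if_pos rfl]
            unfold pvMix
            rw [if_pos (by omega)]
            exact (pvBK_succ rb R C hRC).symm
          · rw [if_neg h]
            unfold pvMix
            by_cases h2 : R ≤ s ∧ s < R + C
            · rw [if_pos h2, if_pos (by omega)]
            · rw [if_neg h2, if_neg (by omega)]
        · rw [if_neg hg]
          have hR0 : R = 0 := by omega
          have hC0 : C = 0 := by omega
          subst hR0; subst hC0
          apply List.map_congr_left
          intro s hs
          unfold pvMix
          by_cases h : s = 0
          · subst h
            rw [if_neg (by omega), if_pos (by omega)]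
            unfold pvBK; simp
          · rw [if_neg (by omega), if_neg (by omega)]
      rw [hstep]
      have : ((C : Int) + 1) = ((C + 1 : Nat) : Int) := by push_cast; ring
      rw [this, ih (C + 1) (by omega)]

lemma pv_outer (rb : List (List Int)) (L : Nat) :
    ∀ (k R : Nat), R + k = L →
      (PySem.List.pyRange (R : Int) (L : Int)).foldl
          (fun bs row => (PySem.List.pyRange 0 ((L : Int) - row)).foldl (pvBStep rb row) bs)
          ((List.range L).map (pvBK rb R))
        = (List.range L).map (pvBK rb L) := by
  intro k
  induction k with
  | zero =>
      intro R hR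
      have : R = L := by omega
      subst this
      rw [PySem.List.pyRange_one_eq_nil (by omega)]
      simp
  | succ k ih =>
      intro R hR
      have hRL : R < L := by omega
      rw [PySem.List.pyRange_one_cons (by omega), List.foldl_cons]
      have hinit : (List.range L).map (pvBK rb R) = (List.range L).map (pvMix rb R 0) := by
        apply List.map_congr_left
        intro s _
        unfold pvMix
        rw [if_neg (by omega)]
      have hin := pv_inner rb L R hRL (L - R) 0 (by omega)
      rw [Nat.cast_zero] at hin
      rw [hinit, hin]
      have hfin : (List.range L).map (pvMix rb R (L - R)) = (List.range L).map (pvBK rb (R + 1)) := by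
        apply List.map_congr_left
        intro s hs
        rw [List.mem_range] at hs
        unfold pvMix
        by_cases h : R ≤ s
        · rw [if_pos ⟨h, by omega⟩]
        · rw [if_neg (by omega)]
          exact pvBK_stable rb R (R + 1) s (by omega) (by omega)
      rw [hfin]
      have : ((R : Int) + 1) = ((R + 1 : Nat) : Int) := by push_cast; ring
      rw [this, ih (R + 1) (by omega)]

lemma pvBK_zero (rb : List (List Int)) : ∀ s, pvBK rb 0 s = [] := by
  intro s
  unfold pvBK
  by_cases h : s = 0 <;> simp [h]

lemma pvBuckets_eq (l : Int) (rb : List (List Int)) (hl : 0 < l) :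
    pvBuckets rb l = (List.range l.toNat).map (pvBK rb l.toNat) := by
  unfold pvBuckets
  have hlL : l = ((l.toNat : Nat) : Int) := by omega
  have hb0 : (PySem.List.pyRange 0 l).map (fun _ => ([] : List Int))
      = (List.range l.toNat).map (pvBK rb 0) := by
    rw [PySem.List.pyRange_one, List.map_map, sub_zero]
    apply List.map_congr_left
    intro s _
    simp [pvBK_zero]
  rw [hb0]
  have houter := pv_outer rb l.toNat l.toNat 0 (by omega)
  rw [Int.natCast_zero] at houter
  rw [← hlL] at houter
  exact houter

lemma pvB_eq (l : Int) (rb ml : List (List Int)) :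
    upToDownDiagonalsPart1_alt l rb ml = ml ++ (PySem.List.pyRange 1 l).map (fun s => pvDiag rb s) := by
  unfold upToDownDiagonalsPart1_alt
  by_cases hl : l ≤ 0
  · rw [PySem.List.pyRange_one_eq_nil (by omega)]
    simp
  · rw [pvBuckets_eq l rb (by omega)]
    rw [PySem.List.foldl_append_singleton_eq_map]
    congr 1
    apply List.map_congr_left
    intro s hs
    rw [PySem.List.mem_pyRange_one] at hs
    have hs0 : 0 ≤ s := by omega
    have hsl : s.toNat < l.toNat := by omega

    rw [PySem.List.pyGetD_eq_getElem _ _ hs0 (by simp; omega)]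
    simp only [List.getElem_map, List.getElem_range]
    unfold pvBK pvDiag
    rw [if_neg (by omega)]
    have hmin : min l.toNat (s.toNat + 1) = s.toNat + 1 := by omega
    have hsn : (s + 1).toNat = s.toNat + 1 := by omega
    rw [hmin, hsn]
    apply List.map_congr_left
    intro r _
    congr 1
    omega

-- ===== VERDICT (by name: the statement is the Claim_ definition above) =====
theorem upToDownDiagonalsPart1_spec : Claim_equal_upToDownDiagonalsPart1 := by
  intro l rb ml _ _
  unfold Spec_upToDownDiagonalsPart1
  rw [pvA_eq, pvB_eq]
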